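-- pv_equiv track=rewrite | github.com/richy1623/Honours-Project-Archive | data/website/cgi-bin/util/pythonHTML.py | modtable
-- ===== SOURCE A (Python) =====
-- def maxarrlen(arr):
-- 	mx = len(arr[0])
-- 	for i in arr:
-- 		if len(i)>mx:
-- 			mx=len(i)
-- 	return mx
--
-- def modtable(arr):
-- 	maxlen = maxarrlen(arr)
-- 	table=[]
-- 	for i in range(maxlen):
-- 		row = []
-- 		for j in range(len(arr)):
-- 			if len(arr[j])>i:
-- 				row.append(arr[j][i])
-- 			else:
-- 				row.append('')
-- 		table.append(row)
-- 	return table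
-- ===== SOURCE B (Python) =====
-- def maxarrlen(arr):
-- 	mx = len(arr[0])
-- 	for i in arr:
-- 		if len(i)>mx:
-- 			mx=len(i)
-- 	return mx
--
-- def modtable(arr):
-- 	maxlen = maxarrlen(arr)
-- 	table = [[''] * len(arr) for _ in range(maxlen)]
-- 	for j, row in enumerate(arr):
-- 		for i, val in enumerate(row):
-- 			table[i][j] = val
-- 	return table
-- ===== Notes on version B (the rewrite author's own statement) =====
-- stated objective: alternative
-- what changed: A gathers column-major with a per-cell bound check (for each output row i it scans all input rows, testing len(arr[j])>i and indexing arr[j] twice); B pre-allocates a maxlen x len(arr) grid of empty strings with list multiplication and scatters the existing elements row-major with no bound test; Pre_ excludes only arr = [], on which both raise IndexError in maxarrlen.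
import Mathlib
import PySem

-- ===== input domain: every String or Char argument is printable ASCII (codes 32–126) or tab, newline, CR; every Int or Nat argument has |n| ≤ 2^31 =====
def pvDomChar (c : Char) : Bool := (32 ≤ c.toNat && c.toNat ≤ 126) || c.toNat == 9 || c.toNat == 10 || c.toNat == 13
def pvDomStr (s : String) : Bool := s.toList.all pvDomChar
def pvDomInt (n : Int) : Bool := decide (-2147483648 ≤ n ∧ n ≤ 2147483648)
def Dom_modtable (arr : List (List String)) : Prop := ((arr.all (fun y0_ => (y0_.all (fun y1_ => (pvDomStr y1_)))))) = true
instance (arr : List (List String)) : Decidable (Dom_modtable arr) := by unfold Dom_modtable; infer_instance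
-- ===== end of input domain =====

-- B transposes the jagged array by pre-allocating a padded grid and scattering elements
-- row-major (no per-cell bound check) instead of A's column-major gather with a bound
-- test per cell: an alternative decomposition, same cost.

-- ===== PORT A =====
-- shared module-level helper maxarrlen (identical source line-for-line in both Source A and Source B);
-- len(arr[0]) raises IndexError on arr = [], excluded by Pre_modtable (the [] => 0 branch is unreachable there)
def pyMaxarrlen (arr : List (List String)) : Nat :=
  match arr with
  | [] => 0
  | h :: t => List.foldl (fun mx i => if i.length > mx then i.length else mx) h.length (h :: t)

-- arr[j] and arr[j][i] are in range where evaluated (j < len(arr); the branch guard gives i < len(arr[j])),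
-- so the getD defaults are never taken
def modtable (arr : List (List String)) : List (List String) :=
  let maxlen := pyMaxarrlen arr
  List.foldl (fun table i =>
      table ++ [List.foldl (fun row j =>
          row ++ [if (arr.getD j []).length > i then (arr.getD j []).getD i "" else ""])
        [] (List.range arr.length)])
    [] (List.range maxlen)

-- ===== PORT B =====
-- inner loop: for i, val in enumerate(row): table[i][j] = val
def scatterRow : List (List String) → Nat → Nat → List String → List (List String)
  | t, _, _, [] => t
  | t, j, i, v :: vs => scatterRow (t.modify i (fun r => r.set j v)) j (i + 1) vs

-- outer loop: for j, row in enumerate(arr)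
def scatterAll : List (List String) → Nat → List (List String) → List (List String)
  | t, _, [] => t
  | t, j, row :: rows => scatterAll (scatterRow t j 0 row) (j + 1) rows

def modtable_alt (arr : List (List String)) : List (List String) :=
  let maxlen := pyMaxarrlen arr
  let table := (List.range maxlen).map (fun _ => List.replicate arr.length "")
  scatterAll table 0 arr

-- ===== PRECONDITION & SPEC =====
-- Pre_ excludes only arr = [], on which both A and B raise IndexError (len(arr[0]) in maxarrlen)
def Pre_modtable (arr : List (List String)) : Prop := arr ≠ []
instance (arr : List (List String)) : Decidable (Pre_modtable arr) := by unfold Pre_modtable; infer_instance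
def pvWitness_modtable : List (List String) := [["a"], ["b", "c"]]

def Spec_modtable (arr : List (List String)) (out : List (List String)) : Prop := out = modtable_alt arr
instance (arr : List (List String)) (out : List (List String)) : Decidable (Spec_modtable arr out) := by unfold Spec_modtable; infer_instance

-- ===== CLAIM (what is proved, stated in full; the proofs are below) =====
def Claim_equal_modtable : Prop := ∀ (arr : List (List String)), Dom_modtable arr → Pre_modtable arr → Spec_modtable arr (modtable arr)

-- ===== LEMMAS AND PROOFS =====

-- append-accumulator foldl is a map
theorem foldl_append_map {α β : Type} (f : α → β) (l : List α) (init : List β) :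
    List.foldl (fun acc x => acc ++ [f x]) init l = init ++ l.map f := by
  induction l generalizing init with
  | nil => simp
  | cons h t ih => simp [List.foldl, ih]

-- indexing a list over range of its length is a map
theorem range_map_getD {α β : Type} (f : α → β) (d : α) (l : List α) :
    (List.range l.length).map (fun j => f (l.getD j d)) = l.map f := by
  induction l with
  | nil => simp
  | cons h t ih =>
    simp only [List.length_cons, List.range_succ_eq_map, List.map_cons, List.map_map]
    refine congrArg₂ _ rfl ?_
    simpa [Function.comp] using ih

theorem getElem?_modify' {α : Type} (l : List α) (i k : Nat) (f : α → α) :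
    (l.modify i f)[k]? = if i = k then l[k]?.map f else l[k]? := by
  rw [List.getElem?_modify]
  cases l[k]? <;> split <;> simp_all

-- the canonical value of one output row
theorem modtable_eq (arr : List (List String)) :
    modtable arr = (List.range (pyMaxarrlen arr)).map
      (fun i => arr.map (fun row => if row.length > i then row.getD i "" else "")) := by
  unfold modtable
  rw [foldl_append_map]
  simp only [List.nil_append]
  refine List.map_congr_left (fun i _ => ?_)
  rw [foldl_append_map (fun j => if (arr.getD j []).length > i then (arr.getD j []).getD i "" else "")]
  simpa using range_map_getD (fun row => if row.length > i then row.getD i "" else "") [] arr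

theorem scatterRow_getElem? (row : List String) (t : List (List String)) (j i k : Nat) :
    (scatterRow t j i row)[k]? =
      if i ≤ k ∧ k < i + row.length
      then (t[k]?).map (fun r => r.set j (row.getD (k - i) ""))
      else t[k]? := by
  induction row generalizing t i with
  | nil =>
    simp only [scatterRow, List.length_nil]
    split
    · omega
    · rfl
  | cons v vs ih =>
    simp only [scatterRow, List.length_cons]
    rw [ih, getElem?_modify']
    split_ifs with h1 h2 h3 h4 h5 h6 h7 <;>
      first
      | rfl
      | omega
      | rw [show k - i = (k - (i + 1)) + 1 from by omega, List.getD_cons_succ]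
      | (rw [show k - i = 0 from by omega]; simp)

-- column k of the scatter, collapsed row by row
def colFill (k : Nat) : List String → Nat → List (List String) → List String
  | r, _, [] => r
  | r, j, row :: rows =>
      colFill k (if k < row.length then r.set j (row.getD k "") else r) (j + 1) rows

theorem scatterAll_getElem? (rows : List (List String)) (t : List (List String)) (j k : Nat) :
    (scatterAll t j rows)[k]? = (t[k]?).map (fun r => colFill k r j rows) := by
  induction rows generalizing t j with
  | nil => simp [scatterAll, colFill]
  | cons row rs ih =>
    simp only [scatterAll]
    rw [ih, scatterRow_getElem?]
    by_cases h : k < row.length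
    · rw [if_pos (by omega)]
      cases t[k]? <;> simp [colFill, h]
    · rw [if_neg (by omega)]
      cases t[k]? <;> simp [colFill, h]

theorem colFill_padded (k : Nat) (rows : List (List String)) :
    ∀ (r : List String) (j : Nat), r.length = j + rows.length →
    (∀ m, j ≤ m → m < r.length → r[m]? = some "") →
    colFill k r j rows = r.take j ++ rows.map (fun row => if k < row.length then row.getD k "" else "") := by
  induction rows with
  | nil =>
    intro r j hlen _
    simp only [List.length_nil] at hlen
    simp only [colFill, List.map_nil, List.append_nil]
    exact (List.take_of_length_le (by omega)).symm
  | cons row rs ih =>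
    intro r j hlen hpad
    simp only [colFill]
    set r' : List String := if k < row.length then r.set j (row.getD k "") else r with hr'
    have hlen' : r'.length = r.length := by rw [hr']; split <;> simp
    have hjlt : j < r.length := by simp only [List.length_cons] at hlen; omega
    have hpad' : ∀ m, j + 1 ≤ m → m < r'.length → r'[m]? = some "" := by
      intro m hm hmlt
      rw [hr']
      have := hpad m (by omega) (by omega)
      split
      · rw [List.getElem?_set, if_neg (by omega)]; exact this
      · exact this
    rw [ih r' (j + 1) (by simp only [List.length_cons] at hlen ⊢; omega) hpad']
    have hrj : r'[j]? = some (if k < row.length then row.getD k "" else "") := by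
      rw [hr']
      split
      · rw [List.getElem?_set, if_pos rfl, if_pos hjlt]
      · exact hpad j le_rfl hjlt
    have htake : r'.take j = r.take j := by
      rw [hr']; split
      · exact List.take_set_of_le le_rfl
      · rfl
    rw [List.take_add_one, hrj, htake]
    simp

-- ===== VERDICT (by name: the statement is the Claim_ definition above) =====
theorem modtable_spec : Claim_equal_modtable := by
  intro arr _ _
  unfold Spec_modtable
  rw [modtable_eq]
  unfold modtable_alt
  refine List.ext_getElem? (fun k => ?_)
  rw [scatterAll_getElem?, List.getElem?_map, List.getElem?_map]
  by_cases hk : k < pyMaxarrlen arr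
  · rw [List.getElem?_range hk]
    simp only [Option.map_some]
    refine congrArg _ ?_
    rw [colFill_padded k arr (List.replicate arr.length "") 0 (by simp)
        (fun m _ hm => by simp at hm; simp [hm])]
    simp
  · rw [List.getElem?_eq_none (by simpa using hk)]
    simp
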